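-- pv_equiv track=rewrite | github.com/curtissalisbury/python_projects | web_services/retrieve_from_git/send_to_csv.py | sort_by_year_month
-- ===== SOURCE A (Python) =====
-- def sort_by_year_month(issues):
--     result = {}
--     for issue in issues:
--         if issue['year_month'] not in result:
--             result[issue['year_month']] = {'open': 0, 'closed': 0}
--         if issue['state'] == 'open':
--             result[issue['year_month']]['open'] += 1
--         if issue['state'] == 'closed':
--             result[issue['year_month']]['closed'] += 1
--
--     return result
-- ===== SOURCE B (Python) =====
-- def sort_by_year_month(issues):
--     # Pass 1: group every issue's state under its year_month (first-appearance order).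
--     groups = {}
--     for issue in issues:
--         groups[issue['year_month']] = groups.get(issue['year_month'], []) + [issue['state']]
--     # Pass 2: reshape each state list into the two counts.
--     return {ym: {'open': states.count('open'), 'closed': states.count('closed')}
--             for ym, states in groups.items()}
-- ===== Notes on version B (the rewrite author's own statement) =====
-- stated objective: alternative
-- what changed: B first groups each year_month's state strings into ordered lists in one pass and then materializes the open/closed counts by counting each list, instead of A's single pass that branches per element to increment two running counters inside nested dicts.
import Mathlib
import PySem

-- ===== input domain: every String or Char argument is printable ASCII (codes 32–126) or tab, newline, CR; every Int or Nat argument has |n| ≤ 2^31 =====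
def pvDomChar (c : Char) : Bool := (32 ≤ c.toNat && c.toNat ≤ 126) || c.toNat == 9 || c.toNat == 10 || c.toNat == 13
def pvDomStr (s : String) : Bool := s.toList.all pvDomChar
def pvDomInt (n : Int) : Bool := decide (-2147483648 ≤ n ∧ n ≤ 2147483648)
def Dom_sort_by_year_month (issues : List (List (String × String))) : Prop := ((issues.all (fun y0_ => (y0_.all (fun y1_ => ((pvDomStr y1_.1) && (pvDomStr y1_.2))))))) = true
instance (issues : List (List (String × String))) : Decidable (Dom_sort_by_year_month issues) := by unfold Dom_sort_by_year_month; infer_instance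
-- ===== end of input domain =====

-- B regroups states per year_month and counts afterwards; A keeps running counters. Same value, different decomposition (no speed claim).

-- ===== PORT A =====
-- A's loop body: create a zeroed inner dict on first sight of the year_month, then bump 'open'/'closed'.
-- A missing 'year_month'/'state' key raises KeyError in Python (get? = none): excluded by Pre_, the step skips there.
def pvStepA (result : PySem.Dict String (PySem.Dict String Int)) (issue : List (String × String)) :
    PySem.Dict String (PySem.Dict String Int) :=
  match (PySem.Dict.mk issue).get? "year_month", (PySem.Dict.mk issue).get? "state" with
  | some ym, some st =>
    let result := if result.contains ym then result
                  else result.insert ym (PySem.Dict.ofList [("open", (0 : Int)), ("closed", (0 : Int))])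
    let result := if st == "open" then result.modify ym PySem.Dict.empty (fun m => m.modify "open" 0 (· + 1)) else result
    if st == "closed" then result.modify ym PySem.Dict.empty (fun m => m.modify "closed" 0 (· + 1)) else result
  | _, _ => result

def sort_by_year_month (issues : List (List (String × String))) : List (String × List (String × Int)) :=
  (issues.foldl pvStepA PySem.Dict.empty).items.map (fun p => (p.1, p.2.items))

-- ===== PORT B =====
-- B pass 1 body: groups[ym] = groups.get(ym, []) + [st]  (skips where Python raises KeyError, outside Pre_).
def pvStepB (groups : PySem.Dict String (List String)) (issue : List (String × String)) :
    PySem.Dict String (List String) :=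
  match (PySem.Dict.mk issue).get? "year_month", (PySem.Dict.mk issue).get? "state" with
  | some ym, some st => groups.modify ym [] (· ++ [st])
  | _, _ => groups

-- B pass 2: count each grouped state list.
def sort_by_year_month_alt (issues : List (List (String × String))) : List (String × List (String × Int)) :=
  (issues.foldl pvStepB PySem.Dict.empty).items.map
    (fun p => (p.1, [("open", (PySem.List.count p.2 "open" : Int)), ("closed", (PySem.List.count p.2 "closed" : Int))]))

-- ===== PRECONDITION & SPEC =====
-- Pre_ excludes only issues lacking a 'year_month' or 'state' key, on which Python A raises KeyError (returns nothing).
def Pre_sort_by_year_month (issues : List (List (String × String))) : Prop :=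
  (issues.all (fun issue => (PySem.Dict.mk issue).contains "year_month" && (PySem.Dict.mk issue).contains "state")) = true
instance (issues : List (List (String × String))) : Decidable (Pre_sort_by_year_month issues) := by unfold Pre_sort_by_year_month; infer_instance
def pvWitness_sort_by_year_month : (List (List (String × String))) :=
  [[("year_month", "2020-01"), ("state", "open")], [("year_month", "2020-02"), ("state", "wip")]]

def Spec_sort_by_year_month (issues : List (List (String × String))) (out : List (String × List (String × Int))) : Prop := out = sort_by_year_month_alt issues
instance (issues : List (List (String × String))) (out : List (String × List (String × Int))) : Decidable (Spec_sort_by_year_month issues out) := by unfold Spec_sort_by_year_month; infer_instance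

-- ===== CLAIM (what is proved, stated in full; the proofs are below) =====
def Claim_equal_sort_by_year_month : Prop := ∀ (issues : List (List (String × String))), Dom_sort_by_year_month issues → Pre_sort_by_year_month issues → Spec_sort_by_year_month issues (sort_by_year_month issues)

-- ===== LEMMAS AND PROOFS =====

-- A's inner counter dict with open-count o and closed-count c.
def pvCd (o c : Int) : PySem.Dict String Int := PySem.Dict.mk [("open", o), ("closed", c)]

-- Turn B's groups dict into A's nested-counter dict.
def pvF (p : String × List String) : String × PySem.Dict String Int :=
  (p.1, pvCd (PySem.List.count p.2 "open") (PySem.List.count p.2 "closed"))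

def pvTrans (g : PySem.Dict String (List String)) : PySem.Dict String (PySem.Dict String Int) :=
  PySem.Dict.mk (g.items.map pvF)

lemma pv_modify_eq {κ ν : Type} [BEq κ] (d : PySem.Dict κ ν) (k : κ) (d0 : ν) (f : ν → ν) :
    d.modify k d0 f = d.insert k (f (d.getD k d0)) := rfl

lemma pvCd_modify_open (o c : Int) : (pvCd o c).modify "open" 0 (· + 1) = pvCd (o + 1) c := by
  apply PySem.Dict.ext
  simp [pvCd, PySem.Dict.modify, PySem.Dict.insert, PySem.Dict.contains, PySem.Dict.getD,
        PySem.Dict.get?]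

lemma pvCd_modify_closed (o c : Int) : (pvCd o c).modify "closed" 0 (· + 1) = pvCd o (c + 1) := by
  apply PySem.Dict.ext
  simp [pvCd, PySem.Dict.modify, PySem.Dict.insert, PySem.Dict.contains, PySem.Dict.getD,
        PySem.Dict.get?]

lemma pv_get?_mk_map (l : List (String × List String)) (k : String) :
    (PySem.Dict.mk (l.map pvF)).get? k
      = ((PySem.Dict.mk l).get? k).map (fun sts => pvCd (PySem.List.count sts "open") (PySem.List.count sts "closed")) := by
  induction l with
  | nil => rfl
  | cons p l ih =>
    obtain ⟨a, b⟩ := p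
    simp only [List.map_cons, pvF, PySem.Dict.get?_mk_cons]
    by_cases h : a == k
    · simp [h]
    · simp [h, ih]

lemma pvTrans_get? (g : PySem.Dict String (List String)) (k : String) :
    (pvTrans g).get? k
      = (g.get? k).map (fun sts => pvCd (PySem.List.count sts "open") (PySem.List.count sts "closed")) :=
  pv_get?_mk_map g.items k

lemma pvTrans_keys (g : PySem.Dict String (List String)) : (pvTrans g).keys = g.keys := by
  simp [pvTrans, pvF, PySem.Dict.keys, List.map_map, Function.comp_def]

lemma pvTrans_contains (g : PySem.Dict String (List String)) (k : String) :
    (pvTrans g).contains k = g.contains k := by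
  rw [PySem.Dict.contains_eq_isSome_get?, PySem.Dict.contains_eq_isSome_get?, pvTrans_get?]
  cases g.get? k <;> rfl

lemma pvTrans_insert (g : PySem.Dict String (List String)) (ym : String) (v : List String) :
    pvTrans (g.insert ym v)
      = (pvTrans g).insert ym (pvCd (PySem.List.count v "open") (PySem.List.count v "closed")) := by
  apply PySem.Dict.ext
  by_cases hc : g.contains ym = true
  · rw [show (pvTrans (g.insert ym v)).items = (g.insert ym v).items.map pvF from rfl,
      PySem.Dict.items_insert_of_contains _ _ hc,
      PySem.Dict.items_insert_of_contains _ _ (by rw [pvTrans_contains]; exact hc)]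
    rw [show (pvTrans g).items = g.items.map pvF from rfl]
    simp only [List.map_map]
    apply List.map_congr_left
    intro p _
    by_cases h : p.1 = ym <;> simp [pvF, h]
  · rw [show (pvTrans (g.insert ym v)).items = (g.insert ym v).items.map pvF from rfl,
      PySem.Dict.items_insert_of_not_contains _ _ (by simpa using hc),
      PySem.Dict.items_insert_of_not_contains _ _ (by rw [pvTrans_contains]; simpa using hc)]
    simp [pvTrans, pvF]

lemma pv_insert_get?_self (d : PySem.Dict String (PySem.Dict String Int)) (k : String)
    (v : PySem.Dict String Int) (hnd : d.keys.Nodup) (hg : d.get? k = some v) : d.insert k v = d := by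
  apply PySem.Dict.ext
  rw [PySem.Dict.items_insert_of_contains _ _ (by rw [PySem.Dict.contains_eq_isSome_get?, hg]; rfl)]
  conv_rhs => rw [← List.map_id d.items]
  apply List.map_congr_left
  intro p hp
  by_cases h : p.1 == k
  · have hk : p.1 = k := by simpa using h
    have hv : d.get? p.1 = some p.2 := PySem.Dict.get?_of_mem_items d (by simpa using hp) hnd
    rw [hk, hg] at hv
    have : v = p.2 := Option.some_inj.mp hv
    simp [← hk, this]
  · simp [h]

-- one step of A's loop on the transform of B's state equals the transform of one step of B's loop
lemma pv_step (issue : List (String × String)) (g : PySem.Dict String (List String))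
    (hnd : g.keys.Nodup) : pvStepA (pvTrans g) issue = pvTrans (pvStepB g issue) := by
  unfold pvStepA pvStepB
  cases hym : (PySem.Dict.mk issue).get? "year_month" with
  | none => rfl
  | some ym =>
  cases hst : (PySem.Dict.mk issue).get? "state" with
  | none => rfl
  | some st =>
  simp only []
  have hzero : PySem.Dict.ofList [("open", (0 : Int)), ("closed", (0 : Int))] = pvCd 0 0 := by decide
  set g₀ : PySem.Dict String (List String) := if g.contains ym then g else g.insert ym [] with hg₀
  have hnd₀ : g₀.keys.Nodup := by
    rw [hg₀]; split
    · exact hnd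
    · exact PySem.Dict.nodup_keys_insert _ _ _ hnd
  have hc₀ : g₀.contains ym = true := by
    rw [hg₀]; split
    · assumption
    · exact PySem.Dict.contains_insert_self _ _ _
  have h1 : (if (pvTrans g).contains ym then pvTrans g
              else (pvTrans g).insert ym (PySem.Dict.ofList [("open", (0 : Int)), ("closed", (0 : Int))]))
      = pvTrans g₀ := by
    rw [pvTrans_contains, hg₀]
    split
    · rfl
    · rw [hzero, pvTrans_insert]; rfl
  have hrhs : g.modify ym [] (· ++ [st]) = g₀.insert ym (g₀.getD ym [] ++ [st]) := by
    rw [hg₀, pv_modify_eq]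
    split
    · rfl
    · rename_i hgc
      rw [PySem.Dict.getD_insert_self, PySem.Dict.insert_insert_self,
          PySem.Dict.getD_of_not_contains _ _ (by simpa using hgc)]
  rw [h1, hrhs]
  obtain ⟨sts, hsts⟩ : ∃ sts, g₀.get? ym = some sts := by
    rw [PySem.Dict.contains_eq_isSome_get?] at hc₀
    exact Option.isSome_iff_exists.mp hc₀
  have hgetD : g₀.getD ym [] = sts := by rw [PySem.Dict.getD_eq_get?_getD, hsts]; rfl
  have hgetDT : (pvTrans g₀).getD ym PySem.Dict.empty
      = pvCd (PySem.List.count sts "open") (PySem.List.count sts "closed") := by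
    rw [PySem.Dict.getD_eq_get?_getD, pvTrans_get?, hsts]; rfl
  rw [hgetD, pvTrans_insert]
  by_cases ho : st = "open"
  · subst ho
    rw [if_neg (by decide), if_pos (by decide), pv_modify_eq, hgetDT]
    simp only [pvCd_modify_open]
    simp [PySem.List.count, List.count_append]
  · by_cases hcl : st = "closed"
    · subst hcl
      rw [if_pos (by decide), if_neg (by decide), pv_modify_eq, hgetDT]
      simp only [pvCd_modify_closed]
      simp [PySem.List.count, List.count_append]
    · rw [if_neg (by simp [hcl]), if_neg (by simp [ho])]
      have h4 : PySem.List.count (sts ++ [st]) "open" = PySem.List.count sts "open" := by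
        simp [PySem.List.count, List.count_append, ho]
      have h5 : PySem.List.count (sts ++ [st]) "closed" = PySem.List.count sts "closed" := by
        simp [PySem.List.count, List.count_append, hcl]
      rw [h4, h5]
      exact (pv_insert_get?_self _ _ _ (by rw [pvTrans_keys]; exact hnd₀)
        (by rw [pvTrans_get?, hsts]; rfl)).symm

lemma pv_nodup_stepB (g : PySem.Dict String (List String)) (issue : List (String × String))
    (hnd : g.keys.Nodup) : (pvStepB g issue).keys.Nodup := by
  unfold pvStepB
  cases (PySem.Dict.mk issue).get? "year_month" with
  | none => exact hnd
  | some ym =>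
    cases (PySem.Dict.mk issue).get? "state" with
    | none => exact hnd
    | some st => exact PySem.Dict.nodup_keys_insert _ _ _ hnd

lemma pv_fold (issues : List (List (String × String))) (g : PySem.Dict String (List String))
    (hnd : g.keys.Nodup) :
    issues.foldl pvStepA (pvTrans g) = pvTrans (issues.foldl pvStepB g) := by
  induction issues generalizing g with
  | nil => rfl
  | cons issue rest ih =>
    simp only [List.foldl_cons]
    rw [pv_step issue g hnd]
    exact ih _ (pv_nodup_stepB g issue hnd)

-- ===== VERDICT (by name: the statement is the Claim_ definition above) =====
theorem sort_by_year_month_spec : Claim_equal_sort_by_year_month := by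
  intro issues _ _
  unfold Spec_sort_by_year_month sort_by_year_month sort_by_year_month_alt
  rw [show (PySem.Dict.empty : PySem.Dict String (PySem.Dict String Int)) = pvTrans PySem.Dict.empty from rfl,
      pv_fold issues PySem.Dict.empty (by simp [PySem.Dict.keys, PySem.Dict.empty])]
  simp only [pvTrans, List.map_map]
  rfl
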